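-- pv_equiv track=rewrite | github.com/TylerJ1ger/data-enhance | model/ref/combined-tree-formatter.py | create_tree_output
-- ===== SOURCE A (Python) =====
-- def create_tree_output(structure):
--     """生成格式化的树结构输出"""
--     if not structure:
--         return ""
--
--     # 初始化输出
--     output = [".", ]
--
--     # 跟踪每一级的是否为最后一项
--     is_last_at_level = {}
--
--     for i, (indent, name, is_dir) in enumerate(structure):
--         # 查找下一个同级或更高级别的项目
--         next_at_same_level = False
--         for next_indent, _, _ in structure[i+1:]:
--             if next_indent == indent:
--                 next_at_same_level = True
--                 break
--             elif next_indent < indent: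
--                 break
--
--         # 更新当前级别的最后一项标记
--         is_last_at_level[indent] = not next_at_same_level
--
--         # 生成前缀
--         prefix = ""
--         for level in range(indent):
--             if level in is_last_at_level and is_last_at_level[level]:
--                 prefix += "    "
--             else:
--                 prefix += "│   "
--
--         # 添加连接符号
--         if is_last_at_level[indent]:
--             prefix += "└── "
--         else:
--             prefix += "├── "
--
--         # 添加到输出
--         output.append(prefix + name)
--
--     return "\n".join(output)
-- ===== SOURCE B (Python) =====
-- def create_tree_output(structure):
--     """生成格式化的树结构输出"""
--     if not structure:
--         return ""
--
--     # Backward pass: stack of indents to the right gives, in O(n) amortized,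
--     # whether each item has a following sibling at the same indent level.
--     n = len(structure)
--     last = [False] * n
--     stack = []
--     for i in range(n - 1, -1, -1):
--         d = structure[i][0]
--         while stack and stack[-1] > d:
--             stack.pop()
--         last[i] = not (stack and stack[-1] == d)
--         stack.append(d)
--
--     # Forward pass: render each line using the per-level last-item markers.
--     lines = ["."]
--     is_last = {}
--     for (d, name, _), lst in zip(structure, last):
--         is_last[d] = lst
--         parts = ["    " if is_last.get(lvl) else "│   " for lvl in range(d)]
--         parts.append("└── " if lst else "├── ")
--         parts.append(name)
--         lines.append("".join(parts))
--     return "\n".join(lines)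
-- ===== Notes on version B (the rewrite author's own statement) =====
-- stated objective: alternative
-- what changed: Replaces A's per-item forward rescan of the remaining list for a next same-level sibling by a single right-to-left monotone-stack pass that precomputes every item's is-last flag (O(n) sibling search instead of O(n^2) worst case; timing on random inputs was inconsistent, so no speed claim).
import Mathlib
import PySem

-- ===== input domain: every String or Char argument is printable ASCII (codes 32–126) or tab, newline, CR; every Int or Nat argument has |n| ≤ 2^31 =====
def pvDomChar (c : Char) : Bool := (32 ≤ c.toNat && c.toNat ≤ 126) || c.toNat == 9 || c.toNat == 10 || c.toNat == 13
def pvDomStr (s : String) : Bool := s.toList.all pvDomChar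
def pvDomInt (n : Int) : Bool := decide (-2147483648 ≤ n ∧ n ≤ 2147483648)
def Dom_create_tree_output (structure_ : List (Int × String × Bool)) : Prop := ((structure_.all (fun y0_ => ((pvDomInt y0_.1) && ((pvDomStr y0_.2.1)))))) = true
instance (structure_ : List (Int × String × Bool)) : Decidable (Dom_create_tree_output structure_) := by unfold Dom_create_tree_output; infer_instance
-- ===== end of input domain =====

-- B replaces A's per-item forward rescan for a following same-level sibling by one
-- right-to-left monotone-stack pass that precomputes all is-last flags (objective: alternative).

-- ===== PORT A =====
-- inner loop 'for next_indent, _, _ in structure[i+1:]' with its two breaks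
def pvNextSame (indent : Int) : List (Int × String × Bool) → Bool
  | [] => false
  | (ni, _, _) :: t =>
    if ni = indent then true
    else if ni < indent then false
    else pvNextSame indent t

-- 'for level in range(indent): prefix += …' ('level in dict and dict[level]' = getD level false)
def pvPrefixA (d : PySem.Dict Int Bool) (indent : Int) : String :=
  (PySem.List.pyRange 0 indent 1).foldl
    (fun p level => p ++ (if d.getD level false then "    " else "│   ")) ""

-- the main 'for i, (indent, name, is_dir) in enumerate(structure)' loop; the slice
-- structure[i+1:] is exactly the structural tail 'rest'
def pvLoopA (dict : PySem.Dict Int Bool) : List (Int × String × Bool) → List String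
  | [] => []
  | (indent, name, _) :: rest =>
    let nsl := pvNextSame indent rest
    let d2 := dict.insert indent (!nsl)
    let pre := pvPrefixA d2 indent ++ (if d2.getD indent false then "└── " else "├── ")
    (pre ++ name) :: pvLoopA d2 rest

def create_tree_output (structure_ : List (Int × String × Bool)) : String :=
  if structure_ = [] then ""
  else PySem.Str.join "\n" ("." :: pvLoopA PySem.Dict.empty structure_)

-- ===== PORT B =====
-- backward pass 'for i in range(n-1, -1, -1)' with the monotone stack; returns
-- (the last[] flags for the processed suffix, the stack after processing it)
def pvFlagsB : List (Int × String × Bool) → List Bool × List Int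
  | [] => ([], [])
  | (d, _, _) :: t =>
    let ft := pvFlagsB t
    let st2 := ft.2.dropWhile (fun x => decide (d < x))
    ((!(st2.head? == some d)) :: ft.1, d :: st2)

-- one rendered line: parts = [comprehension] + [glyph, name]; "".join(parts)
def pvLineB (isl : PySem.Dict Int Bool) (d : Int) (lst : Bool) (name : String) : String :=
  PySem.Str.join ""
    (((PySem.List.pyRange 0 d 1).map
        (fun lvl => if isl.getD lvl false then "    " else "│   "))
      ++ [if lst then "└── " else "├── ", name])

-- forward pass 'for (d, name, _), lst in zip(structure, last)'
def pvLoopB (isl : PySem.Dict Int Bool) : List ((Int × String × Bool) × Bool) → List String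
  | [] => []
  | ((d, name, _), lst) :: rest =>
    let isl2 := isl.insert d lst
    pvLineB isl2 d lst name :: pvLoopB isl2 rest

def create_tree_output_alt (structure_ : List (Int × String × Bool)) : String :=
  if structure_ = [] then ""
  else PySem.Str.join "\n" ("." :: pvLoopB PySem.Dict.empty (structure_.zip (pvFlagsB structure_).1))

-- ===== PRECONDITION & SPEC =====
def Spec_create_tree_output (structure_ : List (Int × String × Bool)) (out : String) : Prop := out = create_tree_output_alt structure_
instance (structure_ : List (Int × String × Bool)) (out : String) : Decidable (Spec_create_tree_output structure_ out) := by unfold Spec_create_tree_output; infer_instance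

-- ===== CLAIM (what is proved, stated in full; the proofs are below) =====
def Claim_equal_create_tree_output : Prop := ∀ (structure_ : List (Int × String × Bool)), Dom_create_tree_output structure_ → Spec_create_tree_output structure_ (create_tree_output structure_)

-- ===== LEMMAS AND PROOFS =====

lemma pv_join0_nil : PySem.Str.join "" ([] : List String) = "" := rfl

lemma pv_join0_cons (x : String) (xs : List String) :
    PySem.Str.join "" (x :: xs) = x ++ PySem.Str.join "" xs := by
  apply String.toList_inj.mp
  cases xs <;> simp [PySem.Str.join, PySem.Chars.join, List.intercalate]

lemma pv_join0_append (xs ys : List String) :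
    PySem.Str.join "" (xs ++ ys) = PySem.Str.join "" xs ++ PySem.Str.join "" ys := by
  induction xs with
  | nil => simp [pv_join0_nil, String.empty_append]
  | cons x t ih => simp [pv_join0_cons, ih, String.append_assoc]

lemma pv_foldl_append_join (l : List Int) (f : Int → String) (init : String) :
    l.foldl (fun p x => p ++ f x) init = init ++ PySem.Str.join "" (l.map f) := by
  induction l generalizing init with
  | nil => simp [pv_join0_nil, String.append_empty]
  | cons x t ih => simp [List.foldl_cons, ih, pv_join0_cons, String.append_assoc]

lemma pv_line_eq (isl : PySem.Dict Int Bool) (d : Int) (g name : String)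
    (hg : g = (if isl.getD d false then "└── " else "├── ")) :
    pvPrefixA isl d ++ g ++ name
      = pvLineB isl d (isl.getD d false) name := by
  subst hg
  simp only [pvPrefixA, pvLineB, pv_foldl_append_join, pv_join0_append, pv_join0_cons]
  simp [pv_join0_nil, String.append_assoc, String.append_empty]

lemma pv_dropWhile_dropWhile (p q : Int → Bool) (h : ∀ x, q x = true → p x = true)
    (l : List Int) : (l.dropWhile q).dropWhile p = l.dropWhile p := by
  induction l with
  | nil => rfl
  | cons a t ih =>
    by_cases hq : q a = true
    · simp [hq, h a hq, ih]
    · simp [List.dropWhile_cons, hq]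

lemma pv_scan_eq_stack (d : Int) (t : List (Int × String × Bool)) :
    pvNextSame d t
      = (((pvFlagsB t).2.dropWhile (fun x => decide (d < x))).head? == some d) := by
  induction t with
  | nil => simp [pvNextSame, pvFlagsB]
  | cons a t ih =>
    obtain ⟨ni, nm, b⟩ := a
    simp only [pvNextSame, pvFlagsB]
    by_cases h2 : d < ni
    · have hne : ¬ ni = d := by omega
      have hnlt : ¬ ni < d := by omega
      rw [if_neg hne, if_neg hnlt, ih]
      have hdw : (((pvFlagsB t).2.dropWhile (fun x => decide (ni < x))).dropWhile
          (fun x => decide (d < x))) = (pvFlagsB t).2.dropWhile (fun x => decide (d < x)) := by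
        apply pv_dropWhile_dropWhile
        intro x hx
        simp at hx ⊢
        omega
      simp only [List.dropWhile_cons, decide_eq_true_eq, if_pos h2, hdw]
    · have : (List.dropWhile (fun x => decide (d < x))
          (ni :: (pvFlagsB t).2.dropWhile (fun x => decide (ni < x))))
          = ni :: (pvFlagsB t).2.dropWhile (fun x => decide (ni < x)) := by
        simp [h2]
      rw [this]
      by_cases h1 : ni = d
      · simp [h1]
      · have hlt : ni < d := by omega
        simp [h1, hlt]

lemma pv_loop_eq (s : List (Int × String × Bool)) :
    ∀ dict : PySem.Dict Int Bool,
      pvLoopA dict s = pvLoopB dict (s.zip (pvFlagsB s).1) := by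
  induction s with
  | nil => intro dict; rfl
  | cons a t ih =>
    obtain ⟨d, name, b⟩ := a
    intro dict
    simp only [pvLoopA, pvFlagsB, List.zip_cons_cons, pvLoopB]
    rw [← pv_scan_eq_stack, ← ih]
    congr 1
    rw [pv_line_eq _ _ _ _ rfl, PySem.Dict.getD_insert_self]

-- ===== VERDICT (by name: the statement is the Claim_ definition above) =====
theorem create_tree_output_spec : Claim_equal_create_tree_output := by
  intro s _
  unfold Spec_create_tree_output create_tree_output create_tree_output_alt
  by_cases hs : s = []
  · simp [hs]
  · rw [if_neg hs, if_neg hs, pv_loop_eq]
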